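-- pv_equiv track=rewrite | github.com/pypi-data/pypi-mirror-340 | packages/email-deliverability/email_deliverability-0.1.2.tar.gz/email_deliverability-0.1.2/email_deliverability/list_hygiene/bounce_handler.py | extract_domains_from_bounces
-- ===== SOURCE A (Python) =====
-- def extract_domains_from_bounces(bounces, min_occurrences=3):
--     """
--     Extract problematic domains from bounce records.
--
--     Args:
--         bounces (list): List of bounce records
--         min_occurrences (int): Minimum occurrences to consider a domain problematic
--
--     Returns:
--         dict: Domain statistics
--     """
--     domain_counts = {}
--
--     for bounce in bounces:
--         email = bounce.get("email", "")
--         if '@' in email: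
--             domain = email.split('@')[-1].lower()
--
--             if domain not in domain_counts:
--                 domain_counts[domain] = {"total": 0, "hard": 0, "soft": 0, "spam_block": 0}
--
--             domain_counts[domain]["total"] += 1
--             bounce_type = bounce.get("type", "unknown")
--             if bounce_type in domain_counts[domain]:
--                 domain_counts[domain][bounce_type] += 1
--
--     # Filter by minimum occurrences
--     problematic_domains = {
--         domain: stats for domain, stats in domain_counts.items()
--         if stats["total"] >= min_occurrences
--     }
--
--     return problematic_domains
-- ===== SOURCE B (Python) =====
-- def extract_domains_from_bounces(bounces, min_occurrences=3):
--     """Group bounces by domain first, then aggregate each group and filter."""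
--     groups = {}
--     for bounce in bounces:
--         email = bounce.get("email", "")
--         if '@' in email:
--             domain = email.split('@')[-1].lower()
--             groups.setdefault(domain, []).append(bounce)
--
--     result = {}
--     for domain, grp in groups.items():
--         stats = {"total": 0, "hard": 0, "soft": 0, "spam_block": 0}
--         for bounce in grp:
--             stats["total"] += 1
--             bounce_type = bounce.get("type", "unknown")
--             if bounce_type in stats:
--                 stats[bounce_type] += 1
--         if stats["total"] >= min_occurrences:
--             result[domain] = stats
--     return result
-- ===== Notes on version B (the rewrite author's own statement) =====
-- stated objective: alternative
-- what changed: Replaces A's single interleaved pass (conditional fresh-stats insert + in-place update per bounce, then a post-hoc filter comprehension) with a two-phase decomposition: first group bounces into a domain->list index, then aggregate each group independently and filter as the result dict is built.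
import Mathlib
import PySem

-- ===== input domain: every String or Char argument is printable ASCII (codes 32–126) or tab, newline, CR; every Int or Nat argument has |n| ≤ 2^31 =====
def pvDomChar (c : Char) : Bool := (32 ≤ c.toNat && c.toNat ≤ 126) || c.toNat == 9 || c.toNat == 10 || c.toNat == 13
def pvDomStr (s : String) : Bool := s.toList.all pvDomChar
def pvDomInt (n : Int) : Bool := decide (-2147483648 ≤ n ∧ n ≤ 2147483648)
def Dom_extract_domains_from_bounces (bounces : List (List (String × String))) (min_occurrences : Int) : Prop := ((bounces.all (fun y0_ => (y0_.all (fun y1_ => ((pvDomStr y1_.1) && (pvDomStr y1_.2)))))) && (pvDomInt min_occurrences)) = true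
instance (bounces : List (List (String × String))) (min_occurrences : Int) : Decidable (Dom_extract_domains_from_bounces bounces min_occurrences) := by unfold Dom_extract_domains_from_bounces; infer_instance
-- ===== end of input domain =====

-- B changes the decomposition: A's single interleaved pass (conditional fresh-stats insert plus
-- in-place update, then a filter comprehension) becomes group-by-domain first, then per-group
-- aggregation with the filter applied while building the result; same results, same cost.

-- ===== PORT A =====
-- A's single pass: conditionally insert fresh stats, then update that stats dict in place
-- (`domain_counts[domain][…] += 1` is `modify` on the just-ensured-present key; the default
-- passed to `modify` is never used).  `email.split('@')` never raises for a nonempty separator,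
-- so `split?` is unwrapped with `getD []` (never taken).  The final dict comprehension keeps
-- distinct keys in order, so its items are the filtered items list; nested dicts are rendered
-- as their item lists per the type convention.
def extract_domains_from_bounces (bounces : List (List (String × String))) (min_occurrences : Int) : List (String × List (String × Int)) :=
  let domain_counts : PySem.Dict String (PySem.Dict String Int) :=
    bounces.foldl (fun domain_counts bounce =>
      let email := (PySem.Dict.mk bounce).getD "email" ""
      if PySem.Str.isIn "@" email then
        let domain := PySem.Str.lower (PySem.List.pyGetD ((PySem.Str.split? email "@").getD []) (-1) "")
        let domain_counts :=
          if domain_counts.contains domain then domain_counts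
          else domain_counts.insert domain (PySem.Dict.mk [("total", 0), ("hard", 0), ("soft", 0), ("spam_block", 0)])
        domain_counts.modify domain (PySem.Dict.mk [("total", 0), ("hard", 0), ("soft", 0), ("spam_block", 0)]) (fun stats =>
          let stats := stats.modify "total" 0 (· + 1)
          let bounce_type := (PySem.Dict.mk bounce).getD "type" "unknown"
          if stats.contains bounce_type then stats.modify bounce_type 0 (· + 1) else stats)
      else domain_counts) PySem.Dict.empty
  (domain_counts.items.filter (fun p => min_occurrences ≤ p.2.getD "total" 0)).map (fun p => (p.1, p.2.items))

-- ===== PORT B =====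
-- B phase 1: index bounces by domain (`setdefault(...).append` is `modify` with default []);
-- phase 2: aggregate each group, filtering while the result is built.  The result dict only
-- ever sees fresh distinct keys (groups is a dict), so `result[domain] = stats` appends,
-- rendered as list append.
def extract_domains_from_bounces_alt (bounces : List (List (String × String))) (min_occurrences : Int) : List (String × List (String × Int)) :=
  let groups : PySem.Dict String (List (List (String × String))) :=
    bounces.foldl (fun groups bounce =>
      let email := (PySem.Dict.mk bounce).getD "email" ""
      if PySem.Str.isIn "@" email then
        let domain := PySem.Str.lower (PySem.List.pyGetD ((PySem.Str.split? email "@").getD []) (-1) "")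
        groups.modify domain [] (· ++ [bounce])
      else groups) PySem.Dict.empty
  groups.items.foldl (fun result p =>
    let stats := p.2.foldl (fun stats bounce =>
      let stats := stats.modify "total" 0 (· + 1)
      let bounce_type := (PySem.Dict.mk bounce).getD "type" "unknown"
      if stats.contains bounce_type then stats.modify bounce_type 0 (· + 1) else stats)
      (PySem.Dict.mk [("total", 0), ("hard", 0), ("soft", 0), ("spam_block", 0)])
    if min_occurrences ≤ stats.getD "total" 0 then result ++ [(p.1, stats.items)] else result) []

-- ===== PRECONDITION & SPEC =====
def Spec_extract_domains_from_bounces (bounces : List (List (String × String))) (min_occurrences : Int) (out : List (String × List (String × Int))) : Prop := out = extract_domains_from_bounces_alt bounces min_occurrences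
instance (bounces : List (List (String × String))) (min_occurrences : Int) (out : List (String × List (String × Int))) : Decidable (Spec_extract_domains_from_bounces bounces min_occurrences out) := by unfold Spec_extract_domains_from_bounces; infer_instance

-- ===== CLAIM (what is proved, stated in full; the proofs are below) =====
def Claim_equal_extract_domains_from_bounces : Prop := ∀ (bounces : List (List (String × String))) (min_occurrences : Int), Dom_extract_domains_from_bounces bounces min_occurrences → Spec_extract_domains_from_bounces bounces min_occurrences (extract_domains_from_bounces bounces min_occurrences)

-- ===== LEMMAS AND PROOFS =====

-- Shared pieces of both ports, named so that rewriting is robust.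
def pvHasAt (b : List (String × String)) : Bool :=
  PySem.Str.isIn "@" ((PySem.Dict.mk b).getD "email" "")

def pvKey (b : List (String × String)) : String :=
  PySem.Str.lower (PySem.List.pyGetD ((PySem.Str.split? ((PySem.Dict.mk b).getD "email" "") "@").getD []) (-1) "")

def pvS0 : PySem.Dict String Int :=
  PySem.Dict.mk [("total", 0), ("hard", 0), ("soft", 0), ("spam_block", 0)]

def pvU (b : List (String × String)) (stats : PySem.Dict String Int) : PySem.Dict String Int :=
  let stats := stats.modify "total" 0 (· + 1)
  let bounce_type := (PySem.Dict.mk b).getD "type" "unknown"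
  if stats.contains bounce_type then stats.modify bounce_type 0 (· + 1) else stats

def pvStepA (d : PySem.Dict String (PySem.Dict String Int)) (b : List (String × String)) : PySem.Dict String (PySem.Dict String Int) :=
  (if d.contains (pvKey b) then d else d.insert (pvKey b) pvS0).modify (pvKey b) pvS0 (pvU b)

def pvStepA' (d : PySem.Dict String (PySem.Dict String Int)) (b : List (String × String)) : PySem.Dict String (PySem.Dict String Int) :=
  d.modify (pvKey b) pvS0 (pvU b)

def pvStepB (g : PySem.Dict String (List (List (String × String)))) (b : List (String × String)) : PySem.Dict String (List (List (String × String))) :=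
  g.modify (pvKey b) [] (· ++ [b])

def pvAgg (grp : List (List (String × String))) : PySem.Dict String Int :=
  grp.foldl (fun s b => pvU b s) pvS0

-- A's conditional fresh insert followed by modify is just modify.
lemma absorb_insert_modify (d : PySem.Dict String (PySem.Dict String Int)) (b : List (String × String)) :
    pvStepA d b = pvStepA' d b := by
  unfold pvStepA pvStepA'
  by_cases h : d.contains (pvKey b)
  · simp [h]
  · simp only [h, Bool.false_eq_true, if_false, PySem.Dict.modify]
    rw [PySem.Dict.getD_insert_self, PySem.Dict.insert_insert_self]
    congr 2
    simp [PySem.Dict.getD, (PySem.Dict.get?_eq_none_iff_contains d (pvKey b)).mpr (by simp [h])]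

-- A generic "fold of modifies" characterisation: the value at key c is the fold of the
-- updates of exactly the elements keyed c, started from the value at c.
lemma getD_foldl_modify_key {ν β : Type} (key : β → String) (d0 : ν) (f : β → ν → ν)
    (l : List β) (d : PySem.Dict String ν) (c : String) :
    (l.foldl (fun d x => d.modify (key x) d0 (f x)) d).getD c d0 =
      (l.filter (fun x => key x == c)).foldl (fun s x => f x s) (d.getD c d0) := by
  induction l generalizing d with
  | nil => rfl
  | cons x t ih =>
    simp only [List.foldl_cons, List.filter_cons]
    by_cases h : key x = c
    · simp [h, ih]
    · have hb : (key x == c) = false := by simp [h]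
      simp [hb, ih, PySem.Dict.getD_modify, Ne.symm h]

-- ===== VERDICT (by name: the statement is the Claim_ definition above) =====
theorem extract_domains_from_bounces_spec : Claim_equal_extract_domains_from_bounces := by
  intro bounces min_occurrences _
  unfold Spec_extract_domains_from_bounces
  -- read both ports in terms of the named pieces (definitional)
  have hA : extract_domains_from_bounces bounces min_occurrences =
      ((bounces.foldl (fun d b => if pvHasAt b then pvStepA d b else d) PySem.Dict.empty).items.filter
        (fun p => min_occurrences ≤ p.2.getD "total" 0)).map (fun p => (p.1, p.2.items)) := rfl
  have hB : extract_domains_from_bounces_alt bounces min_occurrences =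
      ((bounces.foldl (fun g b => if pvHasAt b then pvStepB g b else g) PySem.Dict.empty).items.foldl
        (fun result p =>
          if min_occurrences ≤ (pvAgg p.2).getD "total" 0
          then result ++ [(p.1, (pvAgg p.2).items)] else result) []) := rfl
  rw [hA, hB]
  -- drop the non-'@' bounces, and A's conditional insert
  rw [PySem.List.foldl_if_eq_foldl_filter pvHasAt pvStepA bounces PySem.Dict.empty,
      PySem.List.foldl_if_eq_foldl_filter pvHasAt pvStepB bounces PySem.Dict.empty,
      PySem.List.foldl_congr_mem _ pvStepA pvStepA' _ (fun acc x _ => absorb_insert_modify acc x)]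
  set bs := bounces.filter pvHasAt with hbs
  -- both dicts have the same keys, in the same order, without duplicates
  have hndA := PySem.Dict.nodup_keys_foldl_modify_key bs pvKey pvS0 (fun _ b => pvU b)
      PySem.Dict.empty (by simp [PySem.Dict.empty, PySem.Dict.keys])
  have hndB := PySem.Dict.nodup_keys_foldl_modify_key bs pvKey ([] : List (List (String × String)))
      (fun _ b s => s ++ [b]) PySem.Dict.empty (by simp [PySem.Dict.empty, PySem.Dict.keys])
  rw [show (bs.foldl pvStepA' PySem.Dict.empty) =
        bs.foldl (fun d x => d.modify (pvKey x) pvS0 ((fun _ b => pvU b) d x)) PySem.Dict.empty from rfl,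
      PySem.Dict.items_eq_map_keys _ hndA pvS0]
  rw [show (bs.foldl pvStepB PySem.Dict.empty) =
        bs.foldl (fun d x => d.modify (pvKey x) [] ((fun _ b s => s ++ [b]) d x)) PySem.Dict.empty from rfl,
      PySem.Dict.items_eq_map_keys _ hndB []]
  rw [PySem.Dict.keys_foldl_modify_key bs pvKey pvS0 (fun _ b => pvU b) PySem.Dict.empty,
      PySem.Dict.keys_foldl_modify_key bs pvKey ([] : List (List (String × String)))
        (fun _ b s => s ++ [b]) PySem.Dict.empty]
  -- pointwise: the value stored at each key is the fold over that key's group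
  have hvA : ∀ c, (bs.foldl (fun d x => d.modify (pvKey x) pvS0 ((fun _ b => pvU b) d x)) PySem.Dict.empty).getD c pvS0 =
      pvAgg (bs.filter (fun b => pvKey b == c)) := by
    intro c
    rw [getD_foldl_modify_key pvKey pvS0 pvU bs PySem.Dict.empty c]
    simp [pvAgg, PySem.Dict.getD_empty]
  have hvB : ∀ c, (bs.foldl (fun d x => d.modify (pvKey x) [] ((fun _ b s => s ++ [b]) d x)) PySem.Dict.empty).getD c [] =
      bs.filter (fun b => pvKey b == c) := by
    intro c
    rw [getD_foldl_modify_key pvKey [] (fun b s => s ++ [b]) bs PySem.Dict.empty c]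
    simp only [PySem.Dict.getD_empty, PySem.List.foldl_append_singleton_eq_self, List.nil_append]
  -- finish: B's append-if fold is filter+map; both sides are the same map of the same filter
  rw [PySem.List.foldl_append_ite
        (fun p : String × List (List (String × String)) => min_occurrences ≤ (pvAgg p.2).getD "total" 0)
        (fun p => (p.1, (pvAgg p.2).items))]
  simp only [List.nil_append, List.filter_map, List.map_map]
  congr 1
  · funext k
    simp only [Function.comp_apply, hvA k, hvB k]
  · congr 1
    funext k
    simp only [Function.comp_apply, hvA k, hvB k]
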